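-- pv_equiv track=rewrite | github.com/ROMSOC/benchmarks-mip-rail-scheduling | instances/1W_4/driver_model/constraints_hybrid_driver.py | lexicographic_sort
-- ===== SOURCE A (Python) =====
-- def lexicographic_sort(list_of_cliques):
--     if type(list_of_cliques) is list:
--         ans = sorted(list_of_cliques)
--         ans = sorted(ans, key=len, reverse=True)
--         ans = list(ans)
--         return ans
--     if type(list_of_cliques) is dict:
--         ans = list()
--         for k, v in list_of_cliques.items():
--             ans.append(v)
--         ans = sorted(ans)
--         ans = sorted(ans, key=len, reverse=True)
--         ans = list(ans)
--         return ans
-- ===== SOURCE B (Python) =====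
-- def lexicographic_sort(list_of_cliques):
--     if type(list_of_cliques) is list:
--         cliques = list_of_cliques
--     elif type(list_of_cliques) is dict:
--         cliques = list(list_of_cliques.values())
--     else:
--         return None
--     lengths = sorted(set(map(len, cliques)), reverse=True)
--     out = []
--     for length in lengths:
--         out.extend(sorted([c for c in cliques if len(c) == length]))
--     return out
-- ===== Notes on version B (the rewrite author's own statement) =====
-- stated objective: alternative
-- what changed: Replaces A's two composed stable sorted() passes (lexicographic, then by length descending) with a bucket decomposition: group cliques by length and emit, for each distinct length in descending order, that bucket sorted lexicographically.
import Mathlib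
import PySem

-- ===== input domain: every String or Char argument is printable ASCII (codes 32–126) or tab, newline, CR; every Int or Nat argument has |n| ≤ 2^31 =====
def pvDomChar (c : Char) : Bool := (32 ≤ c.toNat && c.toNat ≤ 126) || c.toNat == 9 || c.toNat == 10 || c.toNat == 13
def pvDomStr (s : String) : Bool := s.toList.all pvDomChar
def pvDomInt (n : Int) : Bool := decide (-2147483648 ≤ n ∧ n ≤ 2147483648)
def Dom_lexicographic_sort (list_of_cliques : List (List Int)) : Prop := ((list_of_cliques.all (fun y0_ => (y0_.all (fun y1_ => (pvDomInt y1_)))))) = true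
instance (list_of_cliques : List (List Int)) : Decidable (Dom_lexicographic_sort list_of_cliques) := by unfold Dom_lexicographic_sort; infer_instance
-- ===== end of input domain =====

-- B replaces A's two composed stable sorted() passes by grouping cliques by length and emitting,
-- for each distinct length in descending order, that bucket sorted lexicographically (objective: alternative decomposition).


-- ===== PORT A =====
-- Under the type convention the argument is a list, so A's `type(...) is list` branch is taken.
def lexicographic_sort (list_of_cliques : List (List Int)) : List (List Int) :=
  let ans := PySem.List.sorted list_of_cliques (fun c => c)
  let ans := PySem.List.sorted ans PySem.List.len true
  ans

-- ===== PORT B =====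
def lexicographic_sort_alt (list_of_cliques : List (List Int)) : List (List Int) :=
  let lengths := PySem.List.sorted (PySem.Set.ofList (list_of_cliques.map PySem.List.len)) (fun k => k) true
  lengths.foldl (fun out length =>
    out ++ PySem.List.sorted (list_of_cliques.filter (fun c => PySem.List.len c == length)) (fun c => c)) []

-- ===== PRECONDITION & SPEC =====
def Spec_lexicographic_sort (list_of_cliques : List (List Int)) (out : List (List Int)) : Prop := out = lexicographic_sort_alt list_of_cliques
instance (list_of_cliques : List (List Int)) (out : List (List Int)) : Decidable (Spec_lexicographic_sort list_of_cliques out) := by unfold Spec_lexicographic_sort; infer_instance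

-- ===== CLAIM (what is proved, stated in full; the proofs are below) =====
def Claim_equal_lexicographic_sort : Prop := ∀ (list_of_cliques : List (List Int)), Dom_lexicographic_sort list_of_cliques → Spec_lexicographic_sort list_of_cliques (lexicographic_sort list_of_cliques)

-- ===== LEMMAS AND PROOFS =====

-- bridge between the elaborator's default LT/DecidableLT instances on List Int and the LinearOrder ones
lemma pv_dlt_eq : (fun (a b : List Int) => a.decidableLT b : DecidableLT (List Int)) = LinearOrder.toDecidableLT := by
  funext a b; exact Subsingleton.elim _ _

lemma pv_sorted_id_inst (xs : List (List Int)) (rev : Bool) :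
    @PySem.List.sorted (List Int) (List Int) List.instLT (fun a b => a.decidableLT b) xs (fun c => c) rev =
    @PySem.List.sorted (List Int) (List Int) List.instLinearOrder.toLT LinearOrder.toDecidableLT xs (fun c => c) rev := by
  rw [pv_dlt_eq]

-- The (antisymmetric) target order: length descending, lexicographic within equal length.
def pvR (a b : List Int) : Prop := b.length < a.length ∨ (a.length = b.length ∧ a ≤ b)

lemma pvR_antisymm (a b : List Int) (h1 : pvR a b) (h2 : pvR b a) : a = b := by
  rcases h1 with h1 | ⟨h1, h1'⟩ <;> rcases h2 with h2 | ⟨h2, h2'⟩ <;> try omega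
  exact le_antisymm h1' h2'

lemma pvR_len_le (a b : List Int) (h : pvR a b) : b.length ≤ a.length := by
  rcases h with h | ⟨h, _⟩ <;> omega

lemma pv_insert_pair (x : List Int) (acc : List (List Int))
    (h1 : acc.Pairwise pvR) (h2 : ∀ a ∈ acc, a ≤ x) :
    (PySem.List.insertBy (fun a b => decide (PySem.List.len b < PySem.List.len a)) x acc).Pairwise pvR := by
  induction acc with
  | nil => simp [PySem.List.insertBy]
  | cons y ys ih =>
    simp only [PySem.List.insertBy]
    by_cases hlt : PySem.List.len y < PySem.List.len x
    · simp only [hlt, decide_true, if_true]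
      have hxy : y.length < x.length := by
        simpa [PySem.List.len] using hlt
      constructor
      · intro z hz
        rcases List.mem_cons.mp hz with rfl | hz
        · exact Or.inl hxy
        · have := pvR_len_le y z ((List.pairwise_cons.mp h1).1 z hz)
          exact Or.inl (by omega)
      · exact h1
    · simp only [hlt, decide_false]
      have hle : x.length ≤ y.length := by
        simp [PySem.List.len] at hlt; exact_mod_cast hlt
      rcases List.pairwise_cons.mp h1 with ⟨hy, hys⟩
      refine List.pairwise_cons.mpr ⟨?_, ih hys (fun a ha => h2 a (List.mem_cons_of_mem _ ha))⟩
      intro z hz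
      rcases (PySem.List.mem_insertBy _ _ _ _).mp hz with rfl | hz
      · rcases lt_or_eq_of_le hle with h | h
        · exact Or.inl h
        · exact Or.inr ⟨h.symm, h2 y (List.mem_cons_self)⟩
      · exact hy z hz

lemma pv_fold_pair (ys acc : List (List Int))
    (h1 : acc.Pairwise pvR) (h2 : ys.Pairwise (· ≤ ·))
    (h3 : ∀ a ∈ acc, ∀ y ∈ ys, a ≤ y) :
    (ys.foldl (fun acc x => PySem.List.insertBy (fun a b => decide (PySem.List.len b < PySem.List.len a)) x acc) acc).Pairwise pvR := by
  induction ys generalizing acc with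
  | nil => simpa using h1
  | cons x ys ih =>
    rcases List.pairwise_cons.mp h2 with ⟨hx, hys⟩
    simp only [List.foldl_cons]
    apply ih _ (pv_insert_pair x acc h1 (fun a ha => h3 a ha x List.mem_cons_self)) hys
    intro a ha y hy
    rcases (PySem.List.mem_insertBy _ _ _ _).mp ha with rfl | ha
    · exact hx y hy
    · exact h3 a ha y (List.mem_cons_of_mem _ hy)

lemma pvA_pairwise (xs : List (List Int)) : (lexicographic_sort xs).Pairwise pvR := by
  show (PySem.List.sorted (PySem.List.sorted xs (fun c => c)) PySem.List.len true).Pairwise pvR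
  rw [PySem.List.sorted_rev_eq_foldl_insertBy]
  refine pv_fold_pair _ [] (by simp) ?_ (by simp)
  rw [pv_sorted_id_inst]
  simpa using PySem.List.sorted_pairwise xs (fun c => c)

lemma pvA_perm (xs : List (List Int)) : (lexicographic_sort xs).Perm xs :=
  (PySem.List.sorted_perm _ _ _).trans (PySem.List.sorted_perm _ _ _)

-- B as a flatMap over the strictly decreasing list of distinct lengths
lemma pvB_eq_flatMap (xs : List (List Int)) :
    lexicographic_sort_alt xs =
      (PySem.List.sorted (PySem.Set.ofList (xs.map PySem.List.len)) (fun k => k) true).flatMap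
        (fun length => PySem.List.sorted (xs.filter (fun c => PySem.List.len c == length)) (fun c => c)) := by
  show List.foldl _ [] _ = _
  rw [PySem.List.foldl_append_eq_flatMap]
  simp

lemma pvLs_pairwise_gt (xs : List (List Int)) :
    (PySem.List.sorted (PySem.Set.ofList (xs.map PySem.List.len)) (fun k => k) true).Pairwise (fun a b => b < a) := by
  have hpw := PySem.List.sorted_pairwise_rev (PySem.Set.ofList (xs.map PySem.List.len)) (fun k => k)
  have hnd : (PySem.List.sorted (PySem.Set.ofList (xs.map PySem.List.len)) (fun k => k) true).Nodup :=
    (PySem.List.sorted_perm _ _ _).nodup_iff.mpr (PySem.Set.nodup_ofList _)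
  have := hpw.and hnd
  exact this.imp (fun {a b} h => lt_of_le_of_ne h.1 (Ne.symm h.2))

lemma pv_mem_bucket (xs : List (List Int)) (L : Int) (c : List Int)
    (hc : c ∈ PySem.List.sorted (xs.filter (fun c => PySem.List.len c == L)) (fun c => c)) :
    (c.length : Int) = L := by
  have := (PySem.List.mem_sorted _ _ _ _).mp hc
  have := (List.mem_filter.mp this).2
  simpa [PySem.List.len] using this

lemma pvB_pairwise (xs : List (List Int)) : (lexicographic_sort_alt xs).Pairwise pvR := by
  rw [pvB_eq_flatMap]
  rw [List.pairwise_flatMap]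
  constructor
  · intro L _
    have hpw : (PySem.List.sorted (xs.filter (fun c => PySem.List.len c == L)) (fun c => c)).Pairwise
        (fun a b : List Int => a ≤ b) := by
      rw [pv_sorted_id_inst]
      simpa using PySem.List.sorted_pairwise (xs.filter (fun c => PySem.List.len c == L)) (fun c => c)
    refine List.Pairwise.imp_of_mem ?_ hpw
    intro a b ha hb hab
    have ha' := pv_mem_bucket xs L a ha
    have hb' := pv_mem_bucket xs L b hb
    exact Or.inr ⟨by omega, hab⟩
  · exact (pvLs_pairwise_gt xs).imp (fun {L1 L2} h x hx y hy => by
      have hx' := pv_mem_bucket xs L1 x hx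
      have hy' := pv_mem_bucket xs L2 y hy
      exact Or.inl (by omega))

lemma pv_filter_union {α : Type} (p q : α → Bool) (xs : List α)
    (h : ∀ c ∈ xs, ¬(p c = true ∧ q c = true)) :
    (xs.filter p ++ xs.filter q).Perm (xs.filter (fun c => p c || q c)) := by
  induction xs with
  | nil => simp
  | cons c xs ih =>
    have hd := h c List.mem_cons_self
    have ih' := ih (fun a ha => h a (List.mem_cons_of_mem _ ha))
    by_cases hp : p c = true
    · have hq : q c = false := by
        cases hqc : q c with
        | false => rfl
        | true => exact absurd ⟨hp, hqc⟩ hd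
      simpa [List.filter_cons, hp, hq] using ih'.cons c
    · simp only [Bool.not_eq_true] at hp
      by_cases hq : q c = true
      · simp only [List.filter_cons, hp, hq, Bool.false_or, if_true, Bool.false_eq_true, if_false]
        exact (List.perm_middle).trans (ih'.cons c)
      · simp only [Bool.not_eq_true] at hq
        simpa [List.filter_cons, hp, hq] using ih'
    
lemma pv_partition (Ls : List Int) (xs : List (List Int)) (hnd : Ls.Nodup) :
    (Ls.flatMap (fun L => xs.filter (fun c => PySem.List.len c == L))).Perm
      (xs.filter (fun c => decide (PySem.List.len c ∈ Ls))) := by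
  induction Ls with
  | nil => simp
  | cons L Ls ih =>
    rcases List.nodup_cons.mp hnd with ⟨hL, hnd'⟩
    simp only [List.flatMap_cons]
    have h1 : (xs.filter (fun c => PySem.List.len c == L) ++
        Ls.flatMap (fun L => xs.filter (fun c => PySem.List.len c == L))).Perm
        (xs.filter (fun c => PySem.List.len c == L) ++
          xs.filter (fun c => decide (PySem.List.len c ∈ Ls))) :=
      (ih hnd').append_left _
    refine h1.trans ?_
    have h2 := pv_filter_union (fun c => PySem.List.len c == L)
      (fun c => decide (PySem.List.len c ∈ Ls)) xs
      (fun c _ hc => by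
        have : PySem.List.len c = L := by simpa using hc.1
        exact hL (this ▸ (by simpa using hc.2)))
    refine (h2).trans ?_
    apply List.Perm.of_eq
    apply List.filter_congr
    intro c _
    simp [List.mem_cons]
    tauto

lemma pvB_perm (xs : List (List Int)) : (lexicographic_sort_alt xs).Perm xs := by
  rw [pvB_eq_flatMap]
  set Ls := PySem.List.sorted (PySem.Set.ofList (xs.map PySem.List.len)) (fun k => k) true with hLs
  have hnd : Ls.Nodup := (PySem.List.sorted_perm _ _ _).nodup_iff.mpr (PySem.Set.nodup_ofList _)
  have h1 : (Ls.flatMap (fun L => PySem.List.sorted (xs.filter (fun c => PySem.List.len c == L)) (fun c => c))).Perm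
      (Ls.flatMap (fun L => xs.filter (fun c => PySem.List.len c == L))) := by
    induction Ls with
    | nil => simp
    | cons L Ls ih =>
      simp only [List.flatMap_cons]
      exact (PySem.List.sorted_perm _ _ _).append ih
  refine h1.trans ((pv_partition Ls xs hnd).trans ?_)
  apply List.Perm.of_eq
  rw [List.filter_eq_self]
  intro c hc
  simp only [decide_eq_true_eq, hLs, PySem.List.mem_sorted, PySem.Set.mem_ofList]
  exact List.mem_map_of_mem hc

-- ===== VERDICT (by name: the statement is the Claim_ definition above) =====
theorem lexicographic_sort_spec : Claim_equal_lexicographic_sort := by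
  intro xs _
  show lexicographic_sort xs = lexicographic_sort_alt xs
  refine List.Perm.eq_of_pairwise ?_ (pvA_pairwise xs) (pvB_pairwise xs)
    ((pvA_perm xs).trans (pvB_perm xs).symm)
  intro a b _ _ h1 h2
  exact pvR_antisymm a b h1 h2
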